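-- pv_equiv track=rewrite | github.com/dingqingy/cpen513a2 | utils.py | block2Net
-- ===== SOURCE A (Python) =====
-- def block2Net(num_blocks, nets):
--     '''
--     This function takes a net2block mapping, and convert to a block2net mapping (i.e. block ID -> net IDs)
--     '''
--     blocks = []
--     for i in range(num_blocks):
--         block = []
--         for j in range(len(nets)):
--             if i in nets[j]:
--                 block.append(j)
--         blocks.append(block)
--     return blocks
-- ===== SOURCE B (Python) =====
-- def block2Net(num_blocks, nets):
--     '''
--     This function takes a net2block mapping, and convert to a block2net mapping (i.e. block ID -> net IDs)
--     '''
--     blocks = [[] for _ in range(num_blocks)]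
--     for j, net in enumerate(nets):
--         for b in dict.fromkeys(net):
--             if 0 <= b < num_blocks:
--                 blocks[b].append(j)
--     return blocks
-- ===== Notes on version B (the rewrite author's own statement) =====
-- stated objective: faster
-- what changed: B builds all block lists in one pass over the nets, appending each net id to every (deduplicated, in-range) block it contains, instead of scanning every net once per block id.
import Mathlib
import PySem

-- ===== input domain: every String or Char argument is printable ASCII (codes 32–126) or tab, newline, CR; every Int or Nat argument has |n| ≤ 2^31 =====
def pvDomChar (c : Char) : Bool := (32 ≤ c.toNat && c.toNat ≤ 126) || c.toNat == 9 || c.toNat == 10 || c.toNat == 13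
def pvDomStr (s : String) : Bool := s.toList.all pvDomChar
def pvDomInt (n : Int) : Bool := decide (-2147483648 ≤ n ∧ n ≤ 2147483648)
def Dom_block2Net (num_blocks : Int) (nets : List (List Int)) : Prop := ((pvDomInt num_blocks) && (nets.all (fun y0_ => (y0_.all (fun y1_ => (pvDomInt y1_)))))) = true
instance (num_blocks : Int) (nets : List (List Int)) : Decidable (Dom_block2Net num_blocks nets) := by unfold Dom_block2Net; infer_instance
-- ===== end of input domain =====

-- B inverts the mapping in a single pass over the nets (appending each net id to its blocks'
-- lists) instead of scanning every net once per block; objective: faster (asymptotic).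

-- ===== PORT A =====
def block2Net (num_blocks : Int) (nets : List (List Int)) : List (List Int) :=
  (PySem.List.pyRange 0 num_blocks 1).foldl
    (fun blocks i =>
      blocks ++
        [(PySem.List.pyRange 0 (PySem.List.len nets) 1).foldl
          (fun block j => if i ∈ PySem.List.pyGetD nets j [] then block ++ [j] else block) []])
    []

-- ===== PORT B =====
def block2Net_alt (num_blocks : Int) (nets : List (List Int)) : List (List Int) :=
  (PySem.List.enumerate nets).foldl
    (fun blocks jnet =>
      (PySem.List.dedup jnet.2).foldl
        (fun blocks b =>
          if 0 ≤ b ∧ b < num_blocks then blocks.modify b.toNat (fun bl => bl ++ [jnet.1])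
          else blocks)
        blocks)
    ((PySem.List.pyRange 0 num_blocks 1).map (fun _ => ([] : List Int)))

-- ===== PRECONDITION & SPEC =====
def Spec_block2Net (num_blocks : Int) (nets : List (List Int)) (out : List (List Int)) : Prop := out = block2Net_alt num_blocks nets
instance (num_blocks : Int) (nets : List (List Int)) (out : List (List Int)) : Decidable (Spec_block2Net num_blocks nets out) := by unfold Spec_block2Net; infer_instance

-- ===== CLAIM (what is proved, stated in full; the proofs are below) =====
def Claim_equal_block2Net : Prop := ∀ (num_blocks : Int) (nets : List (List Int)), Dom_block2Net num_blocks nets → Spec_block2Net num_blocks nets (block2Net num_blocks nets)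

-- ===== LEMMAS AND PROOFS =====

/-- Modifying position `b.toNat` of a list mapped over `pyRange 0 n 1` (whose `k`-th
element is `k`) is pointwise: the entry for `i` changes exactly when `i = b`. -/
lemma modify_map_pyRange (n b : Int) (hb0 : 0 ≤ b)
    (f : Int → List Int) (g : List Int → List Int) :
    ((PySem.List.pyRange 0 n 1).map f).modify b.toNat g
      = (PySem.List.pyRange 0 n 1).map (fun i => if i = b then g (f i) else f i) := by
  apply List.ext_getElem
  · simp
  · intro k h1 h2
    rw [List.getElem_modify]
    rw [List.getElem_map, List.getElem_map]
    have hk : ∀ (h : k < (PySem.List.pyRange 0 n 1).length),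
        (PySem.List.pyRange 0 n 1)[k] = (k : Int) := by
      intro h; rw [PySem.List.getElem_pyRange_one]; simp
    rw [hk]
    have hbk : b.toNat = k ↔ (k : Int) = b := by omega
    rw [if_congr hbk rfl rfl]

/-- Inner loop of B: folding one (deduplicated) net over the per-block lists appends
`j` exactly to the blocks that occur in the net (and lie in range). -/
lemma inner_fold (n j : Int) (s : List Int) (hs : s.Nodup) (f : Int → List Int) :
    s.foldl
      (fun blocks b =>
        if 0 ≤ b ∧ b < n then blocks.modify b.toNat (fun bl => bl ++ [j]) else blocks)
      ((PySem.List.pyRange 0 n 1).map f)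
    = (PySem.List.pyRange 0 n 1).map (fun i => f i ++ if i ∈ s then [j] else []) := by
  induction s generalizing f with
  | nil => simp
  | cons b t ih =>
    have hbt : b ∉ t := (List.nodup_cons.mp hs).1
    have ht : t.Nodup := (List.nodup_cons.mp hs).2
    simp only [List.foldl_cons]
    by_cases hb : 0 ≤ b ∧ b < n
    · rw [if_pos hb, modify_map_pyRange n b hb.1, ih ht]
      apply List.map_congr_left
      intro i hi
      by_cases hib : i = b
      · subst hib
        simp [hbt]
      · simp [hib, List.mem_cons]
    · rw [if_neg hb, ih ht]
      apply List.map_congr_left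
      intro i hi
      have hi' := (PySem.List.mem_pyRange_one).mp hi
      have hib : i ≠ b := by omega
      simp [hib, List.mem_cons]

/-- Outer loop of B: the per-block lists after folding a list of (net id, net) pairs. -/
lemma outer_fold (n : Int) (l : List (Int × List Int)) (f : Int → List Int) :
    l.foldl
      (fun blocks jnet =>
        (PySem.List.dedup jnet.2).foldl
          (fun blocks b =>
            if 0 ≤ b ∧ b < n then blocks.modify b.toNat (fun bl => bl ++ [jnet.1])
            else blocks)
          blocks)
      ((PySem.List.pyRange 0 n 1).map f)
    = (PySem.List.pyRange 0 n 1).map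
        (fun i => f i ++ (l.filter (fun p => decide (i ∈ p.2))).map (·.1)) := by
  induction l generalizing f with
  | nil => simp
  | cons p l ih =>
    simp only [List.foldl_cons]
    rw [inner_fold n p.1 (PySem.List.dedup p.2) (PySem.List.nodup_dedup p.2) f, ih]
    apply List.map_congr_left
    intro i _
    by_cases hip : i ∈ p.2
    · simp [hip]
    · simp [hip]

theorem block2Net_eq_alt (num_blocks : Int) (nets : List (List Int)) :
    block2Net num_blocks nets = block2Net_alt num_blocks nets := by
  unfold block2Net block2Net_alt
  rw [PySem.List.enumerate_eq_map_pyRange nets ([] : List Int)]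
  rw [PySem.List.foldl_append_singleton_eq_map, List.nil_append]
  have hmap :
      (List.map (fun j => (j, PySem.List.pyGetD nets j [])) (PySem.List.pyRange 0 (PySem.List.len nets) 1)).foldl
        (fun blocks jnet =>
          (PySem.List.dedup jnet.2).foldl
            (fun blocks b =>
              if 0 ≤ b ∧ b < num_blocks then blocks.modify b.toNat (fun bl => bl ++ [jnet.1])
              else blocks)
            blocks)
        ((PySem.List.pyRange 0 num_blocks 1).map (fun _ => ([] : List Int)))
      = (PySem.List.pyRange 0 num_blocks 1).map
          (fun i =>
            ((List.map (fun j => (j, PySem.List.pyGetD nets j []))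
                (PySem.List.pyRange 0 (PySem.List.len nets) 1)).filter
              (fun p => decide (i ∈ p.2))).map (·.1)) := by
    rw [outer_fold num_blocks _ (fun _ => ([] : List Int))]
    simp
  rw [hmap]
  apply List.map_congr_left
  intro i _
  rw [List.filter_map, List.map_map]
  rw [PySem.List.foldl_append_ite_eq_filter]
  simp [Function.comp_def]

-- ===== VERDICT (by name: the statement is the Claim_ definition above) =====
theorem block2Net_spec : Claim_equal_block2Net := by
  intro num_blocks nets _
  unfold Spec_block2Net
  exact block2Net_eq_alt num_blocks nets
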